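-- pv_equiv track=rewrite | github.com/CodelineAtyab/OrbitXO | examples/from_suhaila/last_project/main.py | resolve_z_value
-- ===== SOURCE A (Python) =====
-- def char_value(c: str) -> int:
--     """Return numeric value of letter: a=1, b=2, ... z=26."""
--     if c.isalpha():
--         return ord(c.lower()) - ord("a") + 1
--     return 0
--
-- def resolve_z_value(s: str, pos: int):
--     """
--     Handles 'z' logic:
--     - 'z' as counter: 26 + next letter value
--     - 'z' as value: adds next letter value recursively
--     """
--     val = char_value("z")
--     next_pos = pos + 1
--
--     if next_pos < len(s):
--         nxt_char = s[next_pos]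
--         if nxt_char.lower() == "z":
--             rec_val, final_pos = resolve_z_value(s, next_pos)
--             return val + rec_val, final_pos
--         return val + char_value(nxt_char), next_pos + 1
--
--     return val, next_pos
-- ===== SOURCE B (Python) =====
-- def char_value(c: str) -> int:
--     """Return numeric value of letter: a=1, b=2, ... z=26."""
--     if c.isalpha():
--         return ord(c.lower()) - ord("a") + 1
--     return 0
--
-- def resolve_z_value(s: str, pos: int):
--     """Two-phase resolution: first scan to find the end of the run of 'z'
--     characters, then compute the total in closed form as 26 * run length
--     plus the value of the terminating character (if any)."""
--     n = len(s)
--     end = pos + 1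
--     while end < n and s[end].lower() == "z":
--         end += 1
--     total = 26 * (end - pos)
--     if end < n:
--         return total + char_value(s[end]), end + 1
--     return total, end
-- ===== Notes on version B (the rewrite author's own statement) =====
-- stated objective: alternative
-- what changed: Replaces A's per-'z' recursive accumulation with a two-phase algorithm: a bare index scan that only finds the end of the 'z'-run, followed by a closed-form total 26 * run length plus the terminating character's value.
import Mathlib
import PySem

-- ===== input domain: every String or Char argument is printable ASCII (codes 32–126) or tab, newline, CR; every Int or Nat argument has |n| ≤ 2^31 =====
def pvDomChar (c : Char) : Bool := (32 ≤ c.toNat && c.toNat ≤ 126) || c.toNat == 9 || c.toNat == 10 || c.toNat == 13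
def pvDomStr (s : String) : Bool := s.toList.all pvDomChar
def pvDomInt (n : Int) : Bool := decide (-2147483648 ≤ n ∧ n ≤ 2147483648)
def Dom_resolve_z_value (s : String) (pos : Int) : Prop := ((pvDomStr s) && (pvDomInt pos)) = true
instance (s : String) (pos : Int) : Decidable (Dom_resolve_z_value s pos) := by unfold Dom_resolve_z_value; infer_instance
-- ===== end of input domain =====

-- B replaces A's per-'z' recursive accumulation with a two-phase scan: find the end
-- of the 'z'-run, then a closed-form total 26 * run length (same cost, different algorithm).

-- ===== PORT A =====
-- char_value: only ever called on single characters here, ported as Char → Int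
def char_value (c : Char) : Int :=
  if PySem.Chars.isalpha c then ((PySem.Chars.lowerChar c).toNat : Int) - 97 + 1 else 0

-- literal port of A's recursion, on the code-point list; the `none` branch of
-- pyGet? is Python's IndexError and is excluded by Pre_resolve_z_value
def resolveA (l : List Char) (pos : Int) : Int × Int :=
  let val := char_value 'z'
  let next_pos := pos + 1
  if h : next_pos < (l.length : Int) then
    match PySem.List.pyGet? l next_pos with
    | none => (0, 0)  -- IndexError; unreachable under Pre_
    | some c =>
      if PySem.Chars.lowerChar c = 'z' then
        let r := resolveA l next_pos
        (val + r.1, r.2)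
      else (val + char_value c, next_pos + 1)
  else (val, next_pos)
termination_by ((l.length : Int) - pos).toNat
decreasing_by omega

def resolve_z_value (s : String) (pos : Int) : Int × Int := resolveA s.toList pos

-- ===== PORT B =====
def char_value_alt (c : Char) : Int :=
  if PySem.Chars.isalpha c then ((PySem.Chars.lowerChar c).toNat : Int) - 97 + 1 else 0

-- phase 1 of B: the bare index scan (`while end < n and s[end].lower() == 'z'`),
-- carrying no accumulator; returns the first index past the 'z'-run
def findEnd (l : List Char) (e : Int) : Int :=
  if h : e < (l.length : Int) then
    match PySem.List.pyGet? l e with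
    | none => e  -- IndexError in Python B; unreachable under Pre_
    | some c => if PySem.Chars.lowerChar c = 'z' then findEnd l (e + 1) else e
  else e
termination_by ((l.length : Int) - e).toNat
decreasing_by omega

-- phase 2 of B: closed-form total from the run length
def resolve_z_value_alt (s : String) (pos : Int) : Int × Int :=
  let l := s.toList
  let e := findEnd l (pos + 1)
  let total := 26 * (e - pos)
  if e < (l.length : Int) then
    match PySem.List.pyGet? l e with
    | none => (0, 0)  -- IndexError; unreachable under Pre_
    | some c => (total + char_value_alt c, e + 1)
  else (total, e)

-- ===== PRECONDITION & SPEC =====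
-- Pre_ excludes exactly the inputs on which Python A raises IndexError
-- (pos+1 strictly below -len(s) while still below len(s)); A returns on everything else.
def Pre_resolve_z_value (s : String) (pos : Int) : Prop :=
  -(PySem.Str.len s) - 1 ≤ pos ∨ PySem.Str.len s - 1 ≤ pos
instance (s : String) (pos : Int) : Decidable (Pre_resolve_z_value s pos) := by
  unfold Pre_resolve_z_value; infer_instance

def pvWitness_resolve_z_value : String × Int := ("azb", 0)

def Spec_resolve_z_value (s : String) (pos : Int) (out : Int × Int) : Prop := out = resolve_z_value_alt s pos
instance (s : String) (pos : Int) (out : Int × Int) : Decidable (Spec_resolve_z_value s pos out) := by unfold Spec_resolve_z_value; infer_instance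

-- ===== CLAIM (what is proved, stated in full; the proofs are below) =====
def Claim_equal_resolve_z_value : Prop := ∀ (s : String) (pos : Int), Dom_resolve_z_value s pos → Pre_resolve_z_value s pos → Spec_resolve_z_value s pos (resolve_z_value s pos)

-- ===== LEMMAS AND PROOFS =====

-- findEnd only moves forward
lemma findEnd_ge (l : List Char) : ∀ e : Int, e ≤ findEnd l e := by
  intro e
  rw [findEnd]
  by_cases h : e < (l.length : Int)
  · rw [dif_pos h]
    cases hc : PySem.List.pyGet? l e with
    | none => simp
    | some c =>
      by_cases hz : PySem.Chars.lowerChar c = 'z'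
      · simp only [hz, reduceIte]
        have := findEnd_ge l (e + 1)
        omega
      · simp [hz]
  · rw [dif_neg h]
termination_by e => ((l.length : Int) - e).toNat
decreasing_by omega

-- A's recursion equals B's two-phase computation
lemma resolveA_eq_alt (l : List Char) :
    ∀ pos : Int, (-(l.length : Int) - 1 ≤ pos ∨ (l.length : Int) - 1 ≤ pos) →
      resolveA l pos =
        (let e := findEnd l (pos + 1)
         if e < (l.length : Int) then
           match PySem.List.pyGet? l e with
           | none => (0, 0)
           | some c => (26 * (e - pos) + char_value_alt c, e + 1)
         else (26 * (e - pos), e)) := by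
  intro pos hpre
  have hcz : char_value 'z' = 26 := by decide
  have hca : ∀ c, char_value c = char_value_alt c := fun _ => rfl
  rw [resolveA, findEnd]
  by_cases h : pos + 1 < (l.length : Int)
  · obtain ⟨c, hc⟩ : ∃ c, PySem.List.pyGet? l (pos + 1) = some c := by
      cases hcc : PySem.List.pyGet? l (pos + 1) with
      | none =>
        exfalso
        have := PySem.List.pyGet?_eq_none_iff (xs := l) (i := pos + 1) |>.mp hcc
        simp [PySem.Raise.InRange] at this
        omega
      | some c => exact ⟨c, rfl⟩
    rw [dif_pos h, dif_pos h, hc]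
    by_cases hz : PySem.Chars.lowerChar c = 'z'
    · have ih := resolveA_eq_alt l (pos + 1) (by omega)
      simp only [hz, reduceIte, ih, hcz]
      set e := findEnd l (pos + 1 + 1) with he
      have hge : pos + 1 + 1 ≤ e := findEnd_ge l (pos + 1 + 1)
      by_cases hlt : e < (l.length : Int)
      · obtain ⟨d, hd⟩ : ∃ d, PySem.List.pyGet? l e = some d := by
          cases hdd : PySem.List.pyGet? l e with
          | none =>
            exfalso
            have := PySem.List.pyGet?_eq_none_iff (xs := l) (i := e) |>.mp hdd
            simp [PySem.Raise.InRange] at this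
            omega
          | some d => exact ⟨d, rfl⟩
        simp only [if_pos hlt, hd, Prod.ext_iff, and_true]
        ring
      · simp only [if_neg hlt, Prod.ext_iff, and_true]
        ring
    · simp only [if_neg hz, hcz, if_pos h, hc, hca c, Prod.ext_iff, and_true]
      ring
  · rw [dif_neg h, dif_neg h, if_neg h, hcz]
    simp only [Prod.ext_iff, and_true]
    ring
termination_by pos => ((l.length : Int) - pos).toNat
decreasing_by omega

-- ===== VERDICT (by name: the statement is the Claim_ definition above) =====
theorem resolve_z_value_spec : Claim_equal_resolve_z_value := by
  intro s pos _ hpre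
  unfold Spec_resolve_z_value resolve_z_value resolve_z_value_alt
  have hpre' : (-(s.toList.length : Int) - 1 ≤ pos ∨ (s.toList.length : Int) - 1 ≤ pos) := by
    simpa [Pre_resolve_z_value, PySem.Str.len_eq] using hpre
  rw [resolveA_eq_alt s.toList pos hpre']
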